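-- pv_equiv track=rewrite | github.com/Gowtham492002/CodeChef-Problem | Chef and Happy String.py | is_happy_substring
-- ===== SOURCE A (Python) =====
-- def is_happy_substring(s):
--     vowels = "aeiou"
--     count = 0
--     for char in s:
--         if char in vowels:
--             count += 1
--             if count > 2:
--                 return True
--         else:
--             count = 0
--     return False
-- ===== SOURCE B (Python) =====
-- def is_happy_substring(s):
--     vowels = "aeiou"
--     return any(s[i] in vowels and s[i + 1] in vowels and s[i + 2] in vowels
--                for i in range(len(s) - 2))
-- ===== Notes on version B (the rewrite author's own statement) =====
-- stated objective: alternative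
-- what changed: Replaces A's running streak counter with an any-over-windows check: B tests each length-3 window of the string for being all vowels.
import Mathlib
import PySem

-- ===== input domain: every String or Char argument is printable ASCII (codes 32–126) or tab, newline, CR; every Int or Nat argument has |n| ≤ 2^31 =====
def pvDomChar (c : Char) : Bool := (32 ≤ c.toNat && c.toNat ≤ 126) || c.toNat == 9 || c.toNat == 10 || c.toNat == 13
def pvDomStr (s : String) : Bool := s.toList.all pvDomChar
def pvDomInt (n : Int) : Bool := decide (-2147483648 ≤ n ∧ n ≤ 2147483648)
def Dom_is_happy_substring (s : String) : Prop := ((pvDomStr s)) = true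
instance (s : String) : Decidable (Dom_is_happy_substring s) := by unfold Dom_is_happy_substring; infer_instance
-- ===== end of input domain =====

-- B changes the decomposition only (any-over-windows instead of a streak counter); same cost, return value identical.

-- ===== PORT A =====
-- `char in "aeiou"`
def pvIsVowel (c : Char) : Bool := "aeiou".toList.contains c

-- A's loop: streak counter with early return True once count > 2
def pvGoA : List Char → Nat → Bool
  | [], _ => false
  | c :: rest, count =>
    if pvIsVowel c then
      (if count + 1 > 2 then true else pvGoA rest (count + 1))
    else
      pvGoA rest 0

def is_happy_substring (s : String) : Bool := pvGoA s.toList 0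

-- ===== PORT B =====
-- B's generator: for each start position, check the three characters of the window
def pvGoB : List Char → Bool
  | a :: b :: c :: rest =>
      (pvIsVowel a && pvIsVowel b && pvIsVowel c) || pvGoB (b :: c :: rest)
  | _ => false

def is_happy_substring_alt (s : String) : Bool := pvGoB s.toList

-- ===== PRECONDITION & SPEC =====
def Spec_is_happy_substring (s : String) (out : Bool) : Prop := out = is_happy_substring_alt s
instance (s : String) (out : Bool) : Decidable (Spec_is_happy_substring s out) := by unfold Spec_is_happy_substring; infer_instance

-- ===== CLAIM (what is proved, stated in full; the proofs are below) =====
def Claim_equal_is_happy_substring : Prop := ∀ (s : String), Dom_is_happy_substring s → Spec_is_happy_substring s (is_happy_substring s)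

-- ===== LEMMAS AND PROOFS =====

-- l starts with at least n vowels
def pvVpre : Nat → List Char → Bool
  | 0, _ => true
  | _ + 1, [] => false
  | n + 1, c :: r => pvIsVowel c && pvVpre n r

theorem pvVpre_succ_or (n : Nat) (l : List Char) :
    (pvVpre (n + 1) l || pvVpre n l) = pvVpre n l := by
  induction n generalizing l with
  | zero => simp [pvVpre]
  | succ m ih =>
    cases l with
    | nil => simp [pvVpre]
    | cons c r =>
      simp only [pvVpre]
      rw [← Bool.and_or_distrib_left, ih r]

theorem pvGoB_cons (c : Char) (r : List Char) :
    pvGoB (c :: r) = (pvVpre 3 (c :: r) || pvGoB r) := by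
  match r with
  | [] => simp [pvGoB, pvVpre]
  | [b] => simp [pvGoB, pvVpre]
  | b :: d :: rest => simp [pvGoB, pvVpre, Bool.and_assoc]

theorem pvGoA_eq (l : List Char) (count : Nat) (h : count ≤ 2) :
    pvGoA l count = (pvGoB l || (decide (0 < count) && pvVpre (3 - count) l)) := by
  induction l generalizing count with
  | nil =>
    have h3 : 3 - count = (2 - count) + 1 := by omega
    simp [pvGoA, pvGoB, h3, pvVpre]
  | cons c r ih =>
    by_cases hv : pvIsVowel c = true
    · rcases Nat.lt_or_ge count 2 with hc | hc
      · have hA : pvGoA (c :: r) count = pvGoA r (count + 1) := by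
          simp [pvGoA, hv]; omega
        rw [hA, ih (count + 1) (by omega), pvGoB_cons]
        have hso := pvVpre_succ_or 1 r
        interval_cases count
        · simp [pvVpre, hv, Bool.or_comm]
        · simp only [pvVpre, hv, Bool.true_and]
          cases hg : pvGoB r <;> cases h2 : pvVpre 2 r <;>
            cases h1 : pvVpre 1 r <;> simp_all
      · have hc2 : count = 2 := by omega
        subst hc2
        have hA : pvGoA (c :: r) 2 = true := by simp [pvGoA, hv]
        rw [hA]
        simp [pvVpre, hv]
    · have hv' : pvIsVowel c = false := by simpa using hv
      have hA : pvGoA (c :: r) count = pvGoA r 0 := by simp [pvGoA, hv']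
      rw [hA, ih 0 (by omega), pvGoB_cons]
      have h3 : 3 - count = (2 - count) + 1 := by omega
      simp [h3, pvVpre, hv']

-- ===== VERDICT (by name: the statement is the Claim_ definition above) =====
theorem is_happy_substring_spec : Claim_equal_is_happy_substring := by
  intro s _
  unfold Spec_is_happy_substring is_happy_substring is_happy_substring_alt
  rw [pvGoA_eq s.toList 0 (by omega)]
  simp
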